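-- pv_equiv track=rewrite | github.com/isjuyeon/routine | 12-37-beta.py | numset
-- ===== SOURCE A (Python) =====
-- def numset(nums):
--     result=[]
--     def dfs(path):
--         if (path != None) and sorted(path) not in result:
--             result.append(path)
--         for i in nums:
--             if i not in path:
--                 l=path[:]
--                 l.append(i)
--                 dfs(l)
--     dfs([])
--     return result
-- ===== SOURCE B (Python) =====
-- def numset(nums):
--     # Iterative DFS with an explicit LIFO stack (children pushed in reverse so
--     # they pop in original order, preserving A's pre-order visit sequence).
--     stack = [[]]
--     result = []
--     while stack:
--         path = stack.pop()
--         if sorted(path) not in result: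
--             result.append(path)
--         for i in reversed(nums):
--             if i not in path:
--                 stack.append(path + [i])
--     return result
-- ===== Notes on version B (the rewrite author's own statement) =====
-- stated objective: alternative
-- what changed: A is a recursive DFS that threads the growing result through nested calls; B replaces the recursion with an explicit LIFO stack loop (children pushed in reverse so they pop in A's pre-order), keeping the same sorted-membership dedup against the live result list.
import Mathlib
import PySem

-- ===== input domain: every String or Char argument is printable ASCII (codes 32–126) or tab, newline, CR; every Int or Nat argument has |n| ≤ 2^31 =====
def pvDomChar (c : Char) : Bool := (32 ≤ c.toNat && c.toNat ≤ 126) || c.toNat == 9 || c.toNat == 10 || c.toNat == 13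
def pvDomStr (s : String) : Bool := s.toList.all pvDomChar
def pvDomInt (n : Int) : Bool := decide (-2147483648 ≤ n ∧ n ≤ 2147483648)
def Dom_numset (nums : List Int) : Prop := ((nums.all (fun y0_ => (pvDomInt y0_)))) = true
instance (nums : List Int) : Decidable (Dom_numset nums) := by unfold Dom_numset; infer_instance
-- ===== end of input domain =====

-- B replaces A's recursive DFS by an explicit LIFO-stack loop with the same
-- sorted-membership dedup against the live result list (objective: alternative).

-- ===== PORT A =====
-- A's recursive dfs, result threaded through the recursion. The Nat fuel is only a
-- totality guard: at the entry call fuel = nums.length + 1 and every recursive call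
-- extends a duplicate-free path over nums, so the 0 case is never reached.
-- A's test `path != None` is always true (path is always a list) and is dropped.
mutual
def numsetDfs (nums : List Int) : Nat → List Int → List (List Int) → List (List Int)
  | 0, _, result => result
  | fuel+1, path, result =>
    let r1 := if (PySem.List.sorted path (fun x => x) false) ∈ result
              then result else result ++ [path]
    numsetLoop nums fuel nums path r1
  termination_by f _ _ => (f, 0, 0)
def numsetLoop (nums : List Int) : Nat → List Int → List Int → List (List Int) → List (List Int)
  | _, [], _, result => result
  | fuel, i :: rest, path, result =>
    if i ∈ path then numsetLoop nums fuel rest path result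
    else numsetLoop nums fuel rest path (numsetDfs nums fuel (path ++ [i]) result)
  termination_by f todo _ _ => (f, 1, todo.length)
end

def numset (nums : List Int) : List (List Int) :=
  numsetDfs nums (nums.length + 1) [] []

-- ===== PORT B =====
-- B's explicit stack: modelled as a list whose HEAD is the top of the stack, so
-- Python's `for i in reversed(nums): stack.append(path+[i])` becomes prepending
-- the extensions in ORIGINAL nums order (the Lean-list reversal cancels Python's
-- reversed()); `stack.pop()` is matching on the head. Each entry carries a Nat
-- depth budget as a totality guard (fuel nums.length + 1 at the initial entry,
-- never exhausted since paths are duplicate-free over nums).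
def numsetStackWeight (n : Nat) (S : List (Nat × List Int)) : Nat :=
  (S.map (fun e => (n + 1) ^ e.1)).sum

theorem numsetStackWeight_push {α : Type} (n f : Nat) (p : List Int) (xs : List α)
    (g : α → List Int) (S : List (Nat × List Int)) (hk : xs.length ≤ n) :
    numsetStackWeight n (xs.map (fun x => (f, g x)) ++ S)
      < numsetStackWeight n ((f + 1, p) :: S) := by
  unfold numsetStackWeight
  simp only [List.map_append, List.map_map, List.sum_append, List.map_cons, List.sum_cons]
  have h1 : ((xs.map ((fun e => (n + 1) ^ e.1) ∘ fun x => (f, g x))).sum)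
      = xs.length * (n + 1) ^ f := by
    have : xs.map ((fun e => (n + 1) ^ e.1) ∘ fun x => (f, g x))
        = List.replicate xs.length ((n + 1) ^ f) := by
      simp [List.eq_replicate_iff]
    rw [this, List.sum_replicate, smul_eq_mul]
  rw [h1]
  have hp : 0 < (n + 1) ^ f := Nat.pow_pos (Nat.succ_pos n)
  have : xs.length * (n + 1) ^ f < (n + 1) ^ (f + 1) := by
    calc xs.length * (n + 1) ^ f < (n + 1) * (n + 1) ^ f := by
          exact Nat.mul_lt_mul_of_lt_of_le (Nat.lt_succ_of_le hk) (le_refl _) hp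
      _ = (n + 1) ^ (f + 1) := by ring
  omega

def numsetStackLoop (nums : List Int) :
    List (Nat × List Int) → List (List Int) → List (List Int)
  | [], result => result
  | (0, _) :: S, result => numsetStackLoop nums S result   -- fuel guard, never reached
  | (f+1, path) :: S, result =>
    let r1 := if (PySem.List.sorted path (fun x => x) false) ∈ result
              then result else result ++ [path]
    numsetStackLoop nums
      ((nums.filter (fun i => ¬ i ∈ path)).map (fun i => (f, path ++ [i])) ++ S) r1
  termination_by S _ => numsetStackWeight nums.length S
  decreasing_by
  · simp [numsetStackWeight]
  · exact numsetStackWeight_push nums.length f path _ _ S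
      (le_trans (List.length_filter_le _ _) (by simp))

def numset_alt (nums : List Int) : List (List Int) :=
  numsetStackLoop nums [(nums.length + 1, [])] []

-- ===== PRECONDITION & SPEC =====
def Spec_numset (nums : List Int) (out : List (List Int)) : Prop := out = numset_alt nums
instance (nums : List Int) (out : List (List Int)) : Decidable (Spec_numset nums out) := by unfold Spec_numset; infer_instance

-- ===== CLAIM =====
def Claim_equal_numset : Prop := ∀ (nums : List Int), Dom_numset nums → Spec_numset nums (numset nums)

-- ===== LEMMAS AND PROOFS =====
-- Popping one entry from the stack computes exactly A's recursive dfs call on it.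
theorem numsetStackLoop_eq_dfs (nums : List Int) (f : Nat) :
    ∀ (p : List Int) (S : List (Nat × List Int)) (r : List (List Int)),
      numsetStackLoop nums ((f, p) :: S) r
        = numsetStackLoop nums S (numsetDfs nums f p r) := by
  induction f with
  | zero => intro p S r; simp [numsetStackLoop, numsetDfs]
  | succ f ih =>
    have hloop : ∀ (todo p : List Int) (S : List (Nat × List Int)) (r : List (List Int)),
        numsetStackLoop nums ((todo.filter (fun i => !decide (i ∈ p))).map (fun i => (f, p ++ [i])) ++ S) r
          = numsetStackLoop nums S (numsetLoop nums f todo p r) := by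
      intro todo
      induction todo with
      | nil => intro p S r; simp [numsetLoop]
      | cons i rest ihr =>
        intro p S r
        by_cases h : i ∈ p
        · simp only [List.filter_cons, h, decide_true, Bool.not_true, Bool.false_eq_true,
            if_false, ihr]
          simp [numsetLoop, h]
        · simp only [List.filter_cons, h, decide_false, Bool.not_false, if_true,
            List.map_cons, List.cons_append]
          rw [ih, ihr]
          simp [numsetLoop, h]
    intro p S r
    rw [numsetStackLoop]
    simp only [decide_not]
    rw [hloop]
    simp [numsetDfs]

-- ===== VERDICT =====
theorem numset_spec : Claim_equal_numset := by
  intro nums _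
  unfold Spec_numset numset numset_alt
  rw [numsetStackLoop_eq_dfs]
  simp [numsetStackLoop]
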